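-- pv_equiv track=rewrite | github.com/brunotaboada/java_migration_projects | utils/code_analysis_visualizer.py | _categorize_imports
-- ===== SOURCE A (Python) =====
-- from typing import Dict, List, Any
--
-- def _categorize_imports(imports: List[str]) -> Dict[str, List[str]]:
--     """Categorize imports into external, internal, etc."""
--     categorized = {
--         'external': [],
--         'internal': [],
--         'standard': []
--     }
--
--     for imp in imports:
--         if imp.startswith('java.') or imp.startswith('javax.'):
--             categorized['standard'].append(imp)
--         elif imp.startswith('com.example.') or imp.startswith('com.') or imp.startswith('org.'):
--             categorized['external'].append(imp)
--         else:
--             categorized['internal'].append(imp)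
--
--     return categorized
-- ===== SOURCE B (Python) =====
-- def _categorize_imports(imports):
--     """Categorize imports into external, internal, etc."""
--     standard = [i for i in imports if i.startswith(('java.', 'javax.'))]
--     external = [i for i in imports if i.startswith(('com.', 'org.'))]
--     internal = [i for i in imports
--                 if not i.startswith(('java.', 'javax.', 'com.', 'org.'))]
--     return {'external': external, 'internal': internal, 'standard': standard}
-- ===== Notes on version B (the rewrite author's own statement) =====
-- stated objective: simpler
-- what changed: Replaces the single dispatch loop with per-category filter passes: three comprehensions, each with a closed prefix predicate (no branch precedence needed since the prefix families are disjoint).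
import Mathlib
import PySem

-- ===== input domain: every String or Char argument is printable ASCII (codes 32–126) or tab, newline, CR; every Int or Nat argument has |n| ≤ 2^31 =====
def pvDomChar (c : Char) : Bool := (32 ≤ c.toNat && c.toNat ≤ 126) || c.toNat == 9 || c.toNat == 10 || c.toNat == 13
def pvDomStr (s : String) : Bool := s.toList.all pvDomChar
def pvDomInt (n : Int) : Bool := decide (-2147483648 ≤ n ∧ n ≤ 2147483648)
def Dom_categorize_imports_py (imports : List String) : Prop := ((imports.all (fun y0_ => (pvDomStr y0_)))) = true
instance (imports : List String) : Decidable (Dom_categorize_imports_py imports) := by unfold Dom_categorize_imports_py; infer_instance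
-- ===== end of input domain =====

-- B replaces A's single dispatch loop by one filter pass per category (the prefix
-- families are disjoint, so no branch precedence is needed); objective: simpler.

-- ===== PORT A =====
-- one loop, dispatching each import into one of three accumulating lists
def catStepA (st : List String × List String × List String) (imp : String) :
    List String × List String × List String :=
  if PySem.Str.startswith imp "java." || PySem.Str.startswith imp "javax." then
    (st.1, st.2.1, st.2.2 ++ [imp])
  else if PySem.Str.startswith imp "com.example." || PySem.Str.startswith imp "com." ||
      PySem.Str.startswith imp "org." then
    (st.1 ++ [imp], st.2.1, st.2.2)
  else
    (st.1, st.2.1 ++ [imp], st.2.2)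

def categorize_imports_py (imports : List String) : List (String × List String) :=
  let st := imports.foldl catStepA ([], [], [])
  [("external", st.1), ("internal", st.2.1), ("standard", st.2.2)]

-- ===== PORT B =====
def isStdB (i : String) : Bool :=
  PySem.Str.startswith i "java." || PySem.Str.startswith i "javax."

def isExtB (i : String) : Bool :=
  PySem.Str.startswith i "com." || PySem.Str.startswith i "org."

def categorize_imports_py_alt (imports : List String) : List (String × List String) :=
  [("external", imports.filter isExtB),
   ("internal", imports.filter (fun i => !(isStdB i || isExtB i))),
   ("standard", imports.filter isStdB)]

-- ===== PRECONDITION & SPEC =====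
def Spec_categorize_imports_py (imports : List String) (out : List (String × List String)) : Prop := out = categorize_imports_py_alt imports
instance (imports : List String) (out : List (String × List String)) : Decidable (Spec_categorize_imports_py imports out) := by unfold Spec_categorize_imports_py; infer_instance

-- ===== CLAIM (what is proved, stated in full; the proofs are below) =====
def Claim_equal_categorize_imports_py : Prop := ∀ (imports : List String), Dom_categorize_imports_py imports → Spec_categorize_imports_py imports (categorize_imports_py imports)

-- ===== LEMMAS AND PROOFS =====

theorem startswith_head {l p : List Char} {a : Char}
    (h : PySem.Chars.startswith l p = true) (ha : p.head? = some a) :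
    l.head? = some a := by
  rw [PySem.Chars.startswith_iff] at h
  obtain ⟨t, rfl⟩ := h
  cases p with
  | nil => simp at ha
  | cons b p => simpa using ha

theorem sw_head {s : String} {p : String} {a : Char}
    (h : PySem.Str.startswith s p = true) (ha : p.toList.head? = some a) :
    s.toList.head? = some a := by
  rw [PySem.Str.startswith_eq] at h
  exact startswith_head h ha

-- a string starting with "java."/"javax." cannot start with "com." or "org."
theorem std_not_ext {s : String} (h : isStdB s = true) : isExtB s = false := by
  have hj : s.toList.head? = some 'j' := by
    rcases Bool.or_eq_true_iff.mp h with h1 | h1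
    · exact sw_head (a := 'j') h1 (by decide)
    · exact sw_head (a := 'j') h1 (by decide)
  cases hE : isExtB s with
  | false => rfl
  | true =>
    exfalso
    rcases Bool.or_eq_true_iff.mp hE with h2 | h2
    · have := sw_head (a := 'c') h2 (by decide); rw [hj] at this; simp at this
    · have := sw_head (a := 'o') h2 (by decide); rw [hj] at this; simp at this

-- the "com.example." test is redundant given the "com." test
theorem ce_imp_com {s : String} (h : PySem.Str.startswith s "com.example." = true) :
    PySem.Str.startswith s "com." = true := by
  rw [PySem.Str.startswith_eq, PySem.Chars.startswith_iff] at h ⊢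
  exact List.IsPrefix.trans (by decide) h

theorem condA_ext_eq (s : String) :
    (PySem.Str.startswith s "com.example." || PySem.Str.startswith s "com." ||
      PySem.Str.startswith s "org.") = isExtB s := by
  unfold isExtB
  cases hce : PySem.Str.startswith s "com.example." with
  | false => simp only [Bool.false_or]
  | true => rw [ce_imp_com hce]; simp only [Bool.true_or]

theorem foldl_inv (xs : List String) (e i s : List String) :
    xs.foldl catStepA (e, i, s) =
      (e ++ xs.filter isExtB,
       i ++ xs.filter (fun x => !(isStdB x || isExtB x)),
       s ++ xs.filter isStdB) := by
  induction xs generalizing e i s with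
  | nil => simp
  | cons x xs ih =>
    simp only [List.foldl_cons]
    cases hstd : isStdB x with
    | true =>
      have hext := std_not_ext hstd
      have hA : catStepA (e, i, s) x = (e, i, s ++ [x]) := by
        unfold isStdB at hstd
        simp only [catStepA]
        rw [hstd]
        simp
      rw [hA, ih]
      simp [hstd, hext]
    | false =>
      cases hext : isExtB x with
      | true =>
        have hA : catStepA (e, i, s) x = (e ++ [x], i, s) := by
          have h2 := condA_ext_eq x
          rw [hext] at h2
          unfold isStdB at hstd
          simp only [catStepA]
          rw [hstd, h2]
          simp
        rw [hA, ih]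
        simp [hstd, hext]
      | false =>
        have hA : catStepA (e, i, s) x = (e, i ++ [x], s) := by
          have h2 := condA_ext_eq x
          rw [hext] at h2
          unfold isStdB at hstd
          simp only [catStepA]
          rw [hstd, h2]
          simp
        rw [hA, ih]
        simp [hstd, hext]

-- ===== VERDICT (by name: the statement is the Claim_ definition above) =====
theorem categorize_imports_py_spec : Claim_equal_categorize_imports_py := by
  intro imports _
  unfold Spec_categorize_imports_py categorize_imports_py categorize_imports_py_alt
  rw [foldl_inv]
  simp
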